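-- pv_equiv track=rewrite | github.com/lixxj/datadog-notebook-generator | test_metric_analysis.py | detect_integration
-- ===== SOURCE A (Python) =====
-- def detect_integration(metric_name):
--     """Detect integration from metric name"""
--     metric_lower = metric_name.lower()
--
--     patterns = {
--         'aws.': 'aws',
--         'nginx.': 'nginx',
--         'mysql.': 'mysql',
--         'redis.': 'redis',
--         'custom.': 'custom'
--     }
--
--     for pattern, integration in patterns.items():
--         if metric_lower.startswith(pattern):
--             return integration
--
--     return 'custom'
-- ===== SOURCE B (Python) =====
-- _KNOWN = {'aws', 'nginx', 'mysql', 'redis', 'custom'}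
--
-- def detect_integration(metric_name):
--     """Detect integration from metric name"""
--     head, sep, _ = metric_name.lower().partition('.')
--     if sep == '.' and head in _KNOWN:
--         return head
--     return 'custom'
-- ===== Notes on version B (the rewrite author's own statement) =====
-- stated objective: simpler
-- what changed: Instead of scanning a dict of dotted patterns with startswith, B splits the lowercased name at the first dot once and does a single membership test of the head against a set of known integrations.
import Mathlib
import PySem

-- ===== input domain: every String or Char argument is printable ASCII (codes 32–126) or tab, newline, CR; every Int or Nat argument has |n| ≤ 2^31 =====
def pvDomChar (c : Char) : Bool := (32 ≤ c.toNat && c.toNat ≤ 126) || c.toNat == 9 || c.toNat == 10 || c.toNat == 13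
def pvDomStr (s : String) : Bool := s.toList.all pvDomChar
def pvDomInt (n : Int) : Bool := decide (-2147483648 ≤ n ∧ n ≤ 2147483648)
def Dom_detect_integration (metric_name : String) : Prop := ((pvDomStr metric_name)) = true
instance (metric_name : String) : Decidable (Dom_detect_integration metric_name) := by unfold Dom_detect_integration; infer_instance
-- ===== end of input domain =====

-- B splits the lowercased name at the first dot once and looks the head up in a set of
-- known integrations, instead of A's scan of a pattern dict with startswith; simpler.

-- ===== PORT A =====
def detect_integration (metric_name : String) : String :=
  let metric_lower := PySem.Str.lower metric_name
  -- the patterns dict is iterated in insertion order; first match returns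
  if PySem.Str.startswith metric_lower "aws." then "aws"
  else if PySem.Str.startswith metric_lower "nginx." then "nginx"
  else if PySem.Str.startswith metric_lower "mysql." then "mysql"
  else if PySem.Str.startswith metric_lower "redis." then "redis"
  else if PySem.Str.startswith metric_lower "custom." then "custom"
  else "custom"

-- ===== PORT B =====
-- str.partition('.') ported by hand over the char list: head = chars before the first '.',
-- sep = "." iff a '.' occurs (exact for the single-char separator '.')
def detect_integration_alt (metric_name : String) : String :=
  let cs := (PySem.Str.lower metric_name).toList
  let head := String.ofList (cs.takeWhile (· ≠ '.'))
  let sep : String := if cs.contains '.' then "." else ""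
  if sep == "." && ["aws", "nginx", "mysql", "redis", "custom"].contains head then head
  else "custom"

-- ===== PRECONDITION & SPEC =====
def Spec_detect_integration (metric_name : String) (out : String) : Prop := out = detect_integration_alt metric_name
instance (metric_name : String) (out : String) : Decidable (Spec_detect_integration metric_name out) := by unfold Spec_detect_integration; infer_instance

-- ===== CLAIM (what is proved, stated in full; the proofs are below) =====
def Claim_equal_detect_integration : Prop := ∀ (metric_name : String), Dom_detect_integration metric_name → Spec_detect_integration metric_name (detect_integration metric_name)

-- ===== LEMMAS AND PROOFS =====

-- For a dot-free pattern p, "p." is a prefix of l iff the chars before the first dot are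
-- exactly p and a dot occurs in l.
theorem prefix_dot_iff (p l : List Char) (hp : '.' ∉ p) :
    (p ++ ['.']) <+: l ↔ (l.takeWhile (· ≠ '.') = p ∧ '.' ∈ l) := by
  induction p generalizing l with
  | nil =>
    cases l with
    | nil => simp
    | cons c t =>
      by_cases hc : c = '.'
      · subst hc; simp
      · simp [hc, List.cons_prefix_cons, Ne.symm hc]
  | cons a p' ih =>
    have ha : a ≠ '.' := fun h => hp (h ▸ List.mem_cons_self)
    have hp' : '.' ∉ p' := fun h => hp (List.mem_cons_of_mem _ h)
    cases l with
    | nil => simp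
    | cons c t =>
      rw [List.cons_append, List.cons_prefix_cons, List.takeWhile_cons]
      by_cases hc : c = '.'
      · subst hc
        constructor
        · rintro ⟨h, -⟩; exact absurd h ha
        · rintro ⟨h, -⟩
          rw [if_neg (by simp)] at h
          exact absurd h.symm (List.cons_ne_nil a p')
      · rw [if_pos (by simp [hc]), List.mem_cons]
        constructor
        · rintro ⟨rfl, h⟩
          obtain ⟨h1, h2⟩ := (ih t hp').1 h
          exact ⟨by rw [h1], Or.inr h2⟩
        · rintro ⟨h1, h2⟩
          rw [List.cons.injEq] at h1
          rcases h2 with h2 | h2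
          · exact absurd h2.symm hc
          · exact ⟨h1.1.symm, (ih t hp').2 ⟨h1.2, h2⟩⟩

theorem detect_integration_eq_alt (metric_name : String) :
    detect_integration metric_name = detect_integration_alt metric_name := by
  unfold detect_integration detect_integration_alt
  dsimp only
  set l := (PySem.Str.lower metric_name).toList with hl
  have hstart : ∀ p : String, PySem.Str.startswith (PySem.Str.lower metric_name) p
      = PySem.Chars.startswith l p.toList := by
    intro p; simp [PySem.Str.startswith_eq, hl]
  have key : ∀ (p : List Char), '.' ∉ p →
      (PySem.Chars.startswith l (p ++ ['.']) = true ↔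
        (l.takeWhile (· ≠ '.') = p ∧ '.' ∈ l)) := by
    intro p hp
    rw [PySem.Chars.startswith_iff]
    exact prefix_dot_iff p l hp
  have hofList : ∀ (s : String), l.takeWhile (· ≠ '.') ≠ s.toList →
      String.ofList (l.takeWhile (· ≠ '.')) ≠ s :=
    fun s h he => h (by rw [← he, String.toList_ofList])
  by_cases hd : '.' ∈ l
  · -- a dot occurs: B's sep is "."
    by_cases h1 : l.takeWhile (· ≠ '.') = "aws".toList
    · rw [hstart, show ("aws." : String).toList = "aws".toList ++ ['.'] from rfl,
        if_pos ((key _ (by decide)).2 ⟨h1, hd⟩)]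
      have hh : String.ofList (l.takeWhile (· ≠ '.')) = "aws" := by
        rw [h1, String.ofList_toList]
      simp only [ne_eq, decide_not] at hh
      simp [hh, hd]
    · rw [hstart, show ("aws." : String).toList = "aws".toList ++ ['.'] from rfl,
        if_neg (by rw [key _ (by decide)]; exact fun h => h1 h.1)]
      by_cases h2 : l.takeWhile (· ≠ '.') = "nginx".toList
      · rw [hstart, show ("nginx." : String).toList = "nginx".toList ++ ['.'] from rfl,
          if_pos ((key _ (by decide)).2 ⟨h2, hd⟩)]
        have hh : String.ofList (l.takeWhile (· ≠ '.')) = "nginx" := by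
          rw [h2, String.ofList_toList]
        simp only [ne_eq, decide_not] at hh
        simp [hh, hd]
      · rw [hstart, show ("nginx." : String).toList = "nginx".toList ++ ['.'] from rfl,
          if_neg (by rw [key _ (by decide)]; exact fun h => h2 h.1)]
        by_cases h3 : l.takeWhile (· ≠ '.') = "mysql".toList
        · rw [hstart, show ("mysql." : String).toList = "mysql".toList ++ ['.'] from rfl,
            if_pos ((key _ (by decide)).2 ⟨h3, hd⟩)]
          have hh : String.ofList (l.takeWhile (· ≠ '.')) = "mysql" := by
            rw [h3, String.ofList_toList]
          simp only [ne_eq, decide_not] at hh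
          simp [hh, hd]
        · rw [hstart, show ("mysql." : String).toList = "mysql".toList ++ ['.'] from rfl,
            if_neg (by rw [key _ (by decide)]; exact fun h => h3 h.1)]
          by_cases h4 : l.takeWhile (· ≠ '.') = "redis".toList
          · rw [hstart, show ("redis." : String).toList = "redis".toList ++ ['.'] from rfl,
              if_pos ((key _ (by decide)).2 ⟨h4, hd⟩)]
            have hh : String.ofList (l.takeWhile (· ≠ '.')) = "redis" := by
              rw [h4, String.ofList_toList]
            simp only [ne_eq, decide_not] at hh
            simp [hh, hd]
          · rw [hstart, show ("redis." : String).toList = "redis".toList ++ ['.'] from rfl,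
              if_neg (by rw [key _ (by decide)]; exact fun h => h4 h.1)]
            by_cases h5 : l.takeWhile (· ≠ '.') = "custom".toList
            · rw [hstart, show ("custom." : String).toList = "custom".toList ++ ['.'] from rfl,
                if_pos ((key _ (by decide)).2 ⟨h5, hd⟩)]
              have hh : String.ofList (l.takeWhile (· ≠ '.')) = "custom" := by
                rw [h5, String.ofList_toList]
              simp only [ne_eq, decide_not] at hh
              simp [hh, hd]
            · rw [hstart, show ("custom." : String).toList = "custom".toList ++ ['.'] from rfl,
                if_neg (by rw [key _ (by decide)]; exact fun h => h5 h.1)]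
              have n1 := hofList "aws" h1
              have n2 := hofList "nginx" h2
              have n3 := hofList "mysql" h3
              have n4 := hofList "redis" h4
              have n5 := hofList "custom" h5
              simp only [ne_eq, decide_not] at n1 n2 n3 n4 n5
              simp [n1, n2, n3, n4, n5]
  · -- no dot: every startswith test fails and B's sep is ""
    have hfail : ∀ (p : List Char), '.' ∉ p →
        PySem.Chars.startswith l (p ++ ['.']) = false := by
      intro p hp
      rw [Bool.eq_false_iff]
      intro h
      exact hd ((key p hp).1 h).2
    rw [hstart, show ("aws." : String).toList = "aws".toList ++ ['.'] from rfl,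
      hfail ("aws".toList) (by decide)]
    rw [hstart, show ("nginx." : String).toList = "nginx".toList ++ ['.'] from rfl,
      hfail ("nginx".toList) (by decide)]
    rw [hstart, show ("mysql." : String).toList = "mysql".toList ++ ['.'] from rfl,
      hfail ("mysql".toList) (by decide)]
    rw [hstart, show ("redis." : String).toList = "redis".toList ++ ['.'] from rfl,
      hfail ("redis".toList) (by decide)]
    rw [hstart, show ("custom." : String).toList = "custom".toList ++ ['.'] from rfl,
      hfail ("custom".toList) (by decide)]
    simp
    intro h
    exact absurd h hd

-- ===== VERDICT (by name: the statement is the Claim_ definition above) =====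
theorem detect_integration_spec : Claim_equal_detect_integration := by
  intro metric_name _
  unfold Spec_detect_integration
  exact detect_integration_eq_alt metric_name
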